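-- pv_equiv track=rewrite | github.com/ajzhanghk/layer-time-geometry | layer_time_ga/generation.py | detect_repetition_string
-- ===== SOURCE A (Python) =====
-- from typing import Optional
--
-- def detect_repetition_string(tokens: list[str],
--                              min_period: int = 2,
--                              max_period: int = 20,
--                              min_repeats: int = 2) -> Optional[int]:
--     """
--     Detect repetition via string matching (baseline for comparison).
--
--     Checks if any substring of length P repeats at least min_repeats
--     times consecutively in the token sequence.
--
--     Args:
--         tokens: List of token strings.
--         min_period: Minimum period length.
--         max_period: Maximum period length.
--         min_repeats: Minimum number of consecutive repeats.
--
--     Returns: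
--         Step where repetition is first detected, or None.
--     """
--     n = len(tokens)
--     for P in range(min_period, min(max_period + 1, n // min_repeats + 1)):
--         for start in range(n - P * min_repeats + 1):
--             pattern = tokens[start:start + P]
--             matches = 0
--             for r in range(1, min_repeats + 1):
--                 chunk_start = start + r * P
--                 chunk_end = chunk_start + P
--                 if chunk_end > n:
--                     break
--                 if tokens[chunk_start:chunk_end] == pattern:
--                     matches += 1
--                 else:
--                     break
--             if matches >= min_repeats:
--                 # Detection fires at the end of the repeated block
--                 return start + P * min_repeats
--     return None
-- ===== SOURCE B (Python) =====
-- def detect_repetition_string(tokens, min_period=2, max_period=20, min_repeats=2):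
--     n = len(tokens)
--     for P in range(min_period, min(max_period + 1, n // min_repeats + 1)):
--         # run-length scan: run counts consecutive i with tokens[i] == tokens[i + P];
--         # a run of length P*min_repeats ending at i means the block of length P
--         # starting at i+1-P*min_repeats repeats min_repeats more times.
--         need = P * min_repeats
--         run = 0
--         for i in range(n - P):
--             run = run + 1 if tokens[i] == tokens[i + P] else 0
--             if run >= need:
--                 return i + 1
--     return None
-- ===== Notes on version B (the rewrite author's own statement) =====
-- stated objective: alternative
-- what changed: Instead of re-comparing, for every start, min_repeats blocks of length P against the pattern slice, B does one run-length scan per period P over the self-match relation tokens[i]==tokens[i+P], returning at the first run of P*min_repeats consecutive matches; on repetition-free inputs both cost about the same, so no speed is claimed.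
-- outside the precondition, e.g. on detect_repetition_string(['a', 'b'], 0, 3, 1): A returns 0, B returns 1; on detect_repetition_string(['a'], -1, 3, 2): A returns -2, B returns 1
import Mathlib
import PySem

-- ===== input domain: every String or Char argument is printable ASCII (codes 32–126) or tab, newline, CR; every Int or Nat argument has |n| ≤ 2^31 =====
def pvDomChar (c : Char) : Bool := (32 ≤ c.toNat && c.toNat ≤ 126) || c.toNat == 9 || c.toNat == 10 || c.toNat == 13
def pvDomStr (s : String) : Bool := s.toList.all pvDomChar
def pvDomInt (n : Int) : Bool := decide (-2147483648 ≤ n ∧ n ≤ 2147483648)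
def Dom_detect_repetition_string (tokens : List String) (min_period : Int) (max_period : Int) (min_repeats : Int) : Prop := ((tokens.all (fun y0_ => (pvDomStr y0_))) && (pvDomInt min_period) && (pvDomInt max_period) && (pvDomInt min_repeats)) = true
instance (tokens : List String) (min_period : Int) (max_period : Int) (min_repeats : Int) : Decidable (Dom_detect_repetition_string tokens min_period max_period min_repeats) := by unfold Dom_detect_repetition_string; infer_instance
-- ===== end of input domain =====

-- B replaces A's per-start re-comparison of min_repeats blocks against the pattern slice by one
-- run-length scan per period over the self-match relation tokens[i] == tokens[i+P] (objective: alternative).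

-- ===== PORT A =====
-- inner 'for r in range(1, min_repeats+1)' loop with its two breaks, carrying 'matches'
def pvA_matchLoop (tokens pattern : List String) (start P n : Int) : List Int → Int → Int
  | [], cnt => cnt
  | r :: rs, cnt =>
    let chunk_start := start + r * P
    let chunk_end := chunk_start + P
    if n < chunk_end then cnt
    else if PySem.List.slice tokens (some chunk_start) (some chunk_end) = pattern then
      pvA_matchLoop tokens pattern start P n rs (cnt + 1)
    else cnt

-- 'for start in range(n - P*min_repeats + 1)' with the early return
def pvA_startLoop (tokens : List String) (P n min_repeats : Int) : List Int → Option Int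
  | [] => none
  | start :: rest =>
    let pattern := PySem.List.slice tokens (some start) (some (start + P))
    let cnt := pvA_matchLoop tokens pattern start P n (PySem.List.pyRange 1 (min_repeats + 1) 1) 0
    if min_repeats ≤ cnt then some (start + P * min_repeats)
    else pvA_startLoop tokens P n min_repeats rest

-- 'for P in range(min_period, min(max_period+1, n//min_repeats+1))'
def pvA_ploop (tokens : List String) (n min_repeats : Int) : List Int → Option Int
  | [] => none
  | P :: Ps =>
    match pvA_startLoop tokens P n min_repeats (PySem.List.pyRange 0 (n - P * min_repeats + 1) 1) with
    | some v => some v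
    | none => pvA_ploop tokens n min_repeats Ps

def detect_repetition_string (tokens : List String) (min_period : Int) (max_period : Int) (min_repeats : Int) : Option Int :=
  let n : Int := tokens.length
  pvA_ploop tokens n min_repeats
    (PySem.List.pyRange min_period (min (max_period + 1) (PySem.Int.floordiv n min_repeats + 1)) 1)

-- ===== PORT B =====
-- 'for i in range(n - P)' run-length scan; tokens[i] and tokens[i+P] are in range on the scanned
-- indices when 1 ≤ P (inside Pre_), where pyGet? returns 'some' and the option equality is Python's ==
def pvB_scan (tokens : List String) (P need : Int) : List Int → Int → Option Int
  | [], _ => none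
  | i :: rest, run =>
    let run' := if PySem.List.pyGet? tokens i = PySem.List.pyGet? tokens (i + P) then run + 1 else 0
    if need ≤ run' then some (i + 1) else pvB_scan tokens P need rest run'

def pvB_ploop (tokens : List String) (n min_repeats : Int) : List Int → Option Int
  | [] => none
  | P :: Ps =>
    let need := P * min_repeats
    match pvB_scan tokens P need (PySem.List.pyRange 0 (n - P) 1) 0 with
    | some v => some v
    | none => pvB_ploop tokens n min_repeats Ps

def detect_repetition_string_alt (tokens : List String) (min_period : Int) (max_period : Int) (min_repeats : Int) : Option Int :=
  let n : Int := tokens.length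
  pvB_ploop tokens n min_repeats
    (PySem.List.pyRange min_period (min (max_period + 1) (PySem.Int.floordiv n min_repeats + 1)) 1)

-- ===== PRECONDITION & SPEC =====
-- Pre_ excludes min_repeats = 0, where A raises ZeroDivisionError, and min_period ≤ 0, outside the
-- natural domain of a block period: there A's empty/negative-length pattern slices compare equal
-- vacuously and it returns degenerate indices (0, or negative numbers), while B's scan would index
-- with Python's negative wraparound or raise IndexError.
def Pre_detect_repetition_string (tokens : List String) (min_period : Int) (max_period : Int) (min_repeats : Int) : Prop :=
  1 ≤ min_period ∧ min_repeats ≠ 0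
instance (tokens : List String) (min_period : Int) (max_period : Int) (min_repeats : Int) : Decidable (Pre_detect_repetition_string tokens min_period max_period min_repeats) := by unfold Pre_detect_repetition_string; infer_instance

def pvWitness_detect_repetition_string : List String × Int × Int × Int := (["x", "y", "x", "y", "x"], 2, 20, 2)

def Spec_detect_repetition_string (tokens : List String) (min_period : Int) (max_period : Int) (min_repeats : Int) (out : Option Int) : Prop := out = detect_repetition_string_alt tokens min_period max_period min_repeats
instance (tokens : List String) (min_period : Int) (max_period : Int) (min_repeats : Int) (out : Option Int) : Decidable (Spec_detect_repetition_string tokens min_period max_period min_repeats out) := by unfold Spec_detect_repetition_string; infer_instance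

-- ===== CLAIM (what is proved, stated in full; the proofs are below) =====
def Claim_equal_detect_repetition_string : Prop := ∀ (tokens : List String) (min_period : Int) (max_period : Int) (min_repeats : Int), Dom_detect_repetition_string tokens min_period max_period min_repeats → Pre_detect_repetition_string tokens min_period max_period min_repeats → Spec_detect_repetition_string tokens min_period max_period min_repeats (detect_repetition_string tokens min_period max_period min_repeats)

-- ===== LEMMAS AND PROOFS =====

-- the self-match relation at period p, in option form (both sides 'some' on in-range indices)
def pvE (toks : List String) (p i : Nat) : Prop := toks[i]? = toks[i + p]?

-- a window: the block of length p at s repeats m further times (all inside the list)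
def pvW (toks : List String) (p m s : Nat) : Prop :=
  s + p * m + p ≤ toks.length ∧ ∀ k, k < p * m → pvE toks p (s + k)

def pvWb (toks : List String) (p m s : Nat) : Bool :=
  decide (s + p * m + p ≤ toks.length) && (List.range (p * m)).all (fun k => toks[s + k]? == toks[s + k + p]?)

lemma pvWb_iff (toks : List String) (p m s : Nat) : pvWb toks p m s = true ↔ pvW toks p m s := by
  simp [pvWb, pvW, pvE, List.all_eq_true]

-- the common specification value per period: first window start, mapped to its detection step
def pvFirst (toks : List String) (p m : Nat) : Option Nat :=
  (List.range (toks.length + 1)).find? (pvWb toks p m)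

def pvSpecOpt (toks : List String) (p m : Nat) : Option Int :=
  (pvFirst toks p m).map (fun s => (s : Int) + (p : Int) * (m : Int))

lemma pvFirst_eq_some (toks : List String) (p m s : Nat) (hp : 1 ≤ p)
    (hw : pvW toks p m s) (hmin : ∀ t, t < s → ¬ pvW toks p m t) :
    pvFirst toks p m = some s := by
  unfold pvFirst
  rw [List.find?_range_eq_some]
  refine ⟨(pvWb_iff toks p m s).mpr hw, ?_, ?_⟩
  · have := hw.1; simp only [List.mem_range]; omega
  · intro j hj
    simp only [Bool.not_eq_eq_eq_not, Bool.not_true]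
    by_contra hb
    have hb' : pvWb toks p m j = true := by
      cases h : pvWb toks p m j with
      | true => rfl
      | false => exact absurd h hb
    exact hmin j hj ((pvWb_iff toks p m j).mp hb')

lemma pvFirst_eq_none (toks : List String) (p m : Nat)
    (h : ∀ s, ¬ pvW toks p m s) : pvFirst toks p m = none := by
  unfold pvFirst
  rw [List.find?_eq_none]
  intro x _ hb
  exact h x ((pvWb_iff toks p m x).mp hb)

-- ---- A side: the match loop counts the all-true prefix of its r-list ----

lemma matchLoop_all (toks pat : List String) (s p n : Int) :
    ∀ (rs : List Int) (acc : Int),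
      (∀ r ∈ rs, s + r * p + p ≤ n ∧
        PySem.List.slice toks (some (s + r * p)) (some (s + r * p + p)) = pat) →
      pvA_matchLoop toks pat s p n rs acc = acc + rs.length := by
  intro rs
  induction rs with
  | nil => intro acc _; simp [pvA_matchLoop]
  | cons r rs ih =>
    intro acc h
    have hr := h r (List.mem_cons_self ..)
    simp only [pvA_matchLoop, List.length_cons]
    rw [if_neg (by omega), if_pos hr.2]
    have := ih (acc + 1) (fun r' hr' => h r' (List.mem_cons_of_mem _ hr'))
    push_cast at this ⊢; omega

lemma matchLoop_not_all (toks pat : List String) (s p n : Int) :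
    ∀ (rs : List Int) (acc : Int),
      (∃ r ∈ rs, ¬ (s + r * p + p ≤ n ∧
        PySem.List.slice toks (some (s + r * p)) (some (s + r * p + p)) = pat)) →
      pvA_matchLoop toks pat s p n rs acc < acc + rs.length := by
  intro rs
  induction rs with
  | nil => intro acc h; simp at h
  | cons r rs ih =>
    intro acc h
    simp only [pvA_matchLoop, List.length_cons]
    rcases h with ⟨r', hr', hfail⟩
    rcases List.mem_cons.mp hr' with rfl | htail
    · split_ifs with h1 h2
      · push_cast; omega
      · exact absurd ⟨by omega, h2⟩ hfail
      · push_cast; omega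
    · split_ifs with h1 h2
      · push_cast; omega
      · have := ih (acc + 1) ⟨r', htail, hfail⟩; push_cast at this ⊢; omega
      · push_cast; omega

lemma blockSlice (toks : List String) (s a p : Nat) :
    PySem.List.slice toks (some ((s : Int) + (a : Int) * (p : Int)))
      (some ((s : Int) + (a : Int) * (p : Int) + (p : Int)))
    = (toks.drop (s + a * p)).take p := by
  have h : ((s : Int) + (a : Int) * (p : Int)) = ((s + a * p : Nat) : Int) := by push_cast; ring
  rw [h, PySem.List.slice_natCast_add]

lemma blockElem (toks : List String) (a p j : Nat) (hj : j < p) :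
    ((toks.drop a).take p)[j]? = toks[a + j]? := by
  rw [List.getElem?_take, if_pos hj, List.getElem?_drop]

-- chaining the self-match relation across r blocks
lemma pvE_chain (toks : List String) (p m s : Nat)
    (hE : ∀ k, k < p * m → pvE toks p (s + k)) :
    ∀ r, r ≤ m → ∀ j, j < p → toks[s + r * p + j]? = toks[s + j]? := by
  intro r
  induction r with
  | zero => intro _ j _; simp
  | succ r ih =>
    intro hr j hj
    have hmul : (r + 1) * p = r * p + p := Nat.succ_mul r p
    have hmm : p * m = m * p := Nat.mul_comm p m
    have hle : (r + 1) * p ≤ m * p := Nat.mul_le_mul_right p hr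
    have hk : r * p + j < p * m := by omega
    have hE' := hE (r * p + j) hk
    unfold pvE at hE'
    rw [show s + (r * p + j) = s + r * p + j by omega] at hE'
    rw [show s + r * p + j + p = s + (r + 1) * p + j by omega] at hE'
    exact hE'.symm.trans (ih (by omega) j hj)

-- the per-start success test of A is exactly the window property
lemma okA_iff_W (toks : List String) (p m s : Nat) (hp : 1 ≤ p) (hm : 1 ≤ m) :
    ((m : Int) ≤ pvA_matchLoop toks
        (PySem.List.slice toks (some (s : Int)) (some ((s : Int) + (p : Int))))
        (s : Int) (p : Int) (toks.length : Int)
        (PySem.List.pyRange 1 ((m : Int) + 1) 1) 0)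
      ↔ pvW toks p m s := by
  have hpat : PySem.List.slice toks (some (s : Int)) (some ((s : Int) + (p : Int)))
      = (toks.drop s).take p := PySem.List.slice_natCast_add toks s p
  have hlen : ((PySem.List.pyRange 1 ((m : Int) + 1) 1).length : Int) = (m : Int) := by
    rw [PySem.List.length_pyRange_one]
    have h1 : ((m : Int) + 1 - 1) = (m : Int) := by ring
    rw [h1, Int.toNat_natCast]
  have hiff : ((m : Int) ≤ pvA_matchLoop toks
        (PySem.List.slice toks (some (s : Int)) (some ((s : Int) + (p : Int))))
        (s : Int) (p : Int) (toks.length : Int)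
        (PySem.List.pyRange 1 ((m : Int) + 1) 1) 0)
      ↔ (∀ r ∈ PySem.List.pyRange 1 ((m : Int) + 1) 1,
          (s : Int) + r * (p : Int) + (p : Int) ≤ (toks.length : Int) ∧
          PySem.List.slice toks (some ((s : Int) + r * (p : Int)))
            (some ((s : Int) + r * (p : Int) + (p : Int)))
          = PySem.List.slice toks (some (s : Int)) (some ((s : Int) + (p : Int)))) := by
    constructor
    · intro hle
      by_contra hno
      obtain ⟨r, hr⟩ := not_forall.mp hno
      obtain ⟨hmem, hC⟩ := Decidable.not_imp_iff_and_not.mp hr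
      have := matchLoop_not_all toks _ (s : Int) (p : Int) (toks.length : Int) _ 0 ⟨r, hmem, hC⟩
      omega
    · intro h
      rw [matchLoop_all toks _ (s : Int) (p : Int) (toks.length : Int) _ 0 h]
      omega
  rw [hiff]
  constructor
  · intro hall
    have hb : ∀ a : Nat, a ≤ m → (toks.drop (s + a * p)).take p = (toks.drop s).take p := by
      intro a ha
      rcases Nat.eq_zero_or_pos a with h0 | hpos
      · subst h0; simp
      · have hmem : ((a : Int)) ∈ PySem.List.pyRange 1 ((m : Int) + 1) 1 := by
          rw [PySem.List.mem_pyRange_one]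
          constructor <;> [exact_mod_cast hpos; exact_mod_cast Nat.lt_succ_of_le ha]
        have hC := (hall (a : Int) hmem).2
        rw [blockSlice, hpat] at hC
        exact hC
    constructor
    · have hmem : ((m : Int)) ∈ PySem.List.pyRange 1 ((m : Int) + 1) 1 := by
        rw [PySem.List.mem_pyRange_one]; constructor <;> [exact_mod_cast hm; omega]
      have hfit := (hall (m : Int) hmem).1
      have hfit' : s + m * p + p ≤ toks.length := by exact_mod_cast hfit
      have : p * m = m * p := Nat.mul_comm p m
      omega
    · intro k hk
      set q := k / p with hq
      set j := k % p with hj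
      have hjp : j < p := Nat.mod_lt _ (by omega)
      have hqp : p * q + j = k := Nat.div_add_mod k p
      have hcm : p * q = q * p := Nat.mul_comm p q
      have hqm : q < m := by
        by_contra hge
        push_neg at hge
        have h1 : p * m ≤ p * q := Nat.mul_le_mul_left p hge
        omega
      have hsm : (q + 1) * p = q * p + p := Nat.succ_mul q p
      unfold pvE
      rw [show s + k = s + q * p + j by omega]
      rw [show s + q * p + j + p = s + (q + 1) * p + j by omega]
      calc toks[s + q * p + j]? = ((toks.drop (s + q * p)).take p)[j]? :=
              (blockElem toks (s + q * p) p j hjp).symm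
        _ = ((toks.drop s).take p)[j]? := by rw [hb q (Nat.le_of_lt hqm)]
        _ = ((toks.drop (s + (q + 1) * p)).take p)[j]? := by rw [hb (q + 1) hqm]
        _ = toks[s + (q + 1) * p + j]? := blockElem toks (s + (q + 1) * p) p j hjp
  · intro hW r hmem
    rw [PySem.List.mem_pyRange_one] at hmem
    have hr0 : 0 ≤ r := by omega
    have hrn : r = ((r.toNat : Nat) : Int) := (Int.toNat_of_nonneg hr0).symm
    set rn := r.toNat with hrndef
    have hrn1 : 1 ≤ rn := by omega
    have hrnm : rn ≤ m := by omega
    have hfit := hW.1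
    have hmul : rn * p ≤ m * p := Nat.mul_le_mul_right p hrnm
    have hcm : p * m = m * p := Nat.mul_comm p m
    rw [hrn]
    constructor
    · have : s + rn * p + p ≤ toks.length := by omega
      exact_mod_cast this
    · rw [blockSlice, hpat]
      apply List.ext_getElem?
      intro jj
      by_cases hjj : jj < p
      · rw [blockElem _ _ _ _ hjj, blockElem _ _ _ _ hjj]
        exact pvE_chain toks p m s hW.2 rn hrnm jj hjj
      · rw [List.getElem?_take, if_neg hjj, List.getElem?_take, if_neg hjj]

-- A's start loop computes the first window
lemma startLoop_eq_spec (toks : List String) (p m : Nat) (hp : 1 ≤ p) (hm : 1 ≤ m) :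
    ∀ (s0 : Nat), (∀ t, t < s0 → ¬ pvW toks p m t) →
      pvA_startLoop toks (p : Int) (toks.length : Int) (m : Int)
        (PySem.List.pyRange (s0 : Int) ((toks.length : Int) - (p : Int) * (m : Int) + 1) 1)
      = pvSpecOpt toks p m := by
  have hpm' : ((p * m : Nat) : Int) = (p : Int) * (m : Int) := by push_cast; ring
  suffices H : ∀ d s0, toks.length + 1 - s0 ≤ d → (∀ t, t < s0 → ¬ pvW toks p m t) →
      pvA_startLoop toks (p : Int) (toks.length : Int) (m : Int)
        (PySem.List.pyRange (s0 : Int) ((toks.length : Int) - (p : Int) * (m : Int) + 1) 1)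
      = pvSpecOpt toks p m by
    intro s0 hmin; exact H (toks.length + 1) s0 (by omega) hmin
  intro d
  induction d with
  | zero =>
    intro s0 hle hmin
    rw [← hpm', PySem.List.pyRange_one_eq_nil (by omega)]
    rw [show pvA_startLoop toks (p : Int) (toks.length : Int) (m : Int) [] = none from rfl]
    rw [pvSpecOpt, pvFirst_eq_none toks p m (fun s hw => hmin s (by have := hw.1; omega) hw)]
    rfl
  | succ d ih =>
    intro s0 hle hmin
    by_cases hlt : (s0 : Int) < (toks.length : Int) - (p : Int) * (m : Int) + 1
    · rw [PySem.List.pyRange_one_cons hlt]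
      simp only [pvA_startLoop]
      by_cases hok : pvW toks p m s0
      · rw [if_pos ((okA_iff_W toks p m s0 hp hm).mpr hok)]
        rw [pvSpecOpt, pvFirst_eq_some toks p m s0 hp hok hmin]
        rfl
      · rw [if_neg (fun hc => hok ((okA_iff_W toks p m s0 hp hm).mp hc))]
        have hlt' : (s0 : Int) < (toks.length : Int) - ((p * m : Nat) : Int) + 1 := by
          rw [hpm']; exact hlt
        rw [show ((s0 : Int) + 1) = ((s0 + 1 : Nat) : Int) by push_cast; ring]
        apply ih (s0 + 1) (by omega)
        intro t ht
        rcases Nat.lt_succ_iff_lt_or_eq.mp ht with h | h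
        · exact hmin t h
        · subst h; exact hok
    · rw [PySem.List.pyRange_one_eq_nil (by omega)]
      rw [show pvA_startLoop toks (p : Int) (toks.length : Int) (m : Int) [] = none from rfl]
      have hge : (toks.length : Int) - ((p * m : Nat) : Int) + 1 ≤ (s0 : Int) := by
        rw [hpm']; omega
      rw [pvSpecOpt, pvFirst_eq_none toks p m (fun s hw => hmin s (by have := hw.1; omega) hw)]
      rfl

-- ---- B side: the run-length scan computes the first window ----

lemma scan_eq_spec (toks : List String) (p m : Nat) (hp : 1 ≤ p) (hm : 1 ≤ m) :
    ∀ (i c : Nat), c ≤ i → c < p * m →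
      (∀ d, d < c → pvE toks p (i - 1 - d)) →
      (c = i ∨ ¬ pvE toks p (i - 1 - c)) →
      (∀ s, pvW toks p m s → i < s + p * m) →
      pvB_scan toks (p : Int) ((p : Int) * (m : Int))
        (PySem.List.pyRange (i : Int) ((toks.length : Int) - (p : Int)) 1) (c : Int)
      = pvSpecOpt toks p m := by
  have hpm' : ((p * m : Nat) : Int) = (p : Int) * (m : Int) := by push_cast; ring
  have hpm0 : 0 < p * m := Nat.mul_pos hp hm
  suffices H : ∀ d i c, toks.length - i ≤ d → c ≤ i → c < p * m →
      (∀ e, e < c → pvE toks p (i - 1 - e)) →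
      (c = i ∨ ¬ pvE toks p (i - 1 - c)) →
      (∀ s, pvW toks p m s → i < s + p * m) →
      pvB_scan toks (p : Int) ((p : Int) * (m : Int))
        (PySem.List.pyRange (i : Int) ((toks.length : Int) - (p : Int)) 1) (c : Int)
      = pvSpecOpt toks p m by
    intro i c h1 h2 h3 h4 h5; exact H toks.length i c (by omega) h1 h2 h3 h4 h5
  intro d
  induction d with
  | zero =>
    intro i c hle _ _ _ _ hno
    rw [PySem.List.pyRange_one_eq_nil (by omega)]
    rw [show pvB_scan toks (p : Int) ((p : Int) * (m : Int)) [] (c : Int) = none from rfl]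
    rw [pvSpecOpt, pvFirst_eq_none toks p m
      (fun s hw => by have := hno s hw; have := hw.1; omega)]
    rfl
  | succ d ih =>
    intro i c hle hci hcm htrue hmax hno
    by_cases hlt : (i : Int) < (toks.length : Int) - (p : Int)
    · have hiN : i + p < toks.length := by omega
      rw [PySem.List.pyRange_one_cons hlt]
      simp only [pvB_scan]
      rw [PySem.List.pyGet?_natCast,
          show ((i : Int) + (p : Int)) = ((i + p : Nat) : Int) by push_cast; ring,
          PySem.List.pyGet?_natCast]
      by_cases hE : toks[i]? = toks[i + p]?
      · rw [if_pos hE]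
        by_cases hdone : ((p : Int) * (m : Int)) ≤ (c : Int) + 1
        · rw [if_pos hdone]
          rw [← hpm'] at hdone
          have hc1 : c + 1 = p * m := by omega
          have hW : pvW toks p m (i - c) := by
            constructor
            · omega
            · intro k hk
              have hk' : k ≤ c := by omega
              rcases Nat.lt_or_ge k c with hkc | hkc
              · have h := htrue (c - 1 - k) (by omega)
                rw [show i - 1 - (c - 1 - k) = i - c + k by omega] at h
                exact h
              · have hkc' : k = c := by omega
                rw [show i - c + k = i by omega]
                exact hE
          have hminW : ∀ t, t < i - c → ¬ pvW toks p m t := by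
            intro t ht hw
            have := hno t hw
            omega
          rw [pvSpecOpt, pvFirst_eq_some toks p m (i - c) hp hW hminW]
          have he : ((i - c : Nat) : Int) + (p : Int) * (m : Int) = (i : Int) + 1 := by
            rw [← hpm']
            exact_mod_cast (show i - c + p * m = i + 1 by omega)
          simp [he]
        · rw [if_neg hdone]
          rw [← hpm'] at hdone
          rw [show ((i : Int) + 1) = ((i + 1 : Nat) : Int) by push_cast; ring,
              show ((c : Int) + 1) = ((c + 1 : Nat) : Int) by push_cast; ring]
          apply ih (i + 1) (c + 1) (by omega) (by omega) (by omega)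
          · intro e he
            cases e with
            | zero =>
              rw [show i + 1 - 1 - 0 = i by omega]
              exact hE
            | succ e =>
              have h := htrue e (by omega)
              rw [show i - 1 - e = i + 1 - 1 - (e + 1) by omega] at h
              exact h
          · rcases hmax with heq | hne
            · exact Or.inl (by omega)
            · exact Or.inr (by rw [show i + 1 - 1 - (c + 1) = i - 1 - c by omega]; exact hne)
          · intro s hw
            have h := hno s hw
            by_contra hle2
            push_neg at hle2
            have hsum : s + p * m = i + 1 := by omega
            rcases hmax with heq | hne
            · omega
            · have hk : i - 1 - c - s < p * m := by omega
              have h2 := hw.2 (i - 1 - c - s) hk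
              rw [show s + (i - 1 - c - s) = i - 1 - c by omega] at h2
              exact hne h2
      · rw [if_neg hE]
        rw [if_neg (by omega)]
        rw [show ((i : Int) + 1) = ((i + 1 : Nat) : Int) by push_cast; ring,
            show (0 : Int) = ((0 : Nat) : Int) by simp]
        apply ih (i + 1) 0 (by omega) (by omega) (by omega)
        · intro e he; omega
        · exact Or.inr (by rw [show i + 1 - 1 - 0 = i by omega]; exact hE)
        · intro s hw
          have h := hno s hw
          by_contra hle2
          push_neg at hle2
          have hsum : s + p * m = i + 1 := by omega
          have hk : i - s < p * m := by omega
          have h2 := hw.2 (i - s) hk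
          rw [show s + (i - s) = i by omega] at h2
          exact hE h2
    · rw [PySem.List.pyRange_one_eq_nil (by omega)]
      rw [show pvB_scan toks (p : Int) ((p : Int) * (m : Int)) [] (c : Int) = none from rfl]
      rw [pvSpecOpt, pvFirst_eq_none toks p m
        (fun s hw => by have := hno s hw; have := hw.1; omega)]
      rfl

-- ---- the outer loop, elementwise ----

lemma ploop_eq (toks : List String) (m : Int) (hm : 1 ≤ m) :
    ∀ (Ps : List Int), (∀ P ∈ Ps, 1 ≤ P) →
      pvA_ploop toks (toks.length : Int) m Ps = pvB_ploop toks (toks.length : Int) m Ps := by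
  intro Ps
  induction Ps with
  | nil => intro _; rfl
  | cons P Ps ih =>
    intro hall
    have hP : 1 ≤ P := hall P (List.mem_cons_self ..)
    have hPe : P = ((P.toNat : Nat) : Int) := (Int.toNat_of_nonneg (by omega)).symm
    have hme : m = ((m.toNat : Nat) : Int) := (Int.toNat_of_nonneg (by omega)).symm
    have hp1 : 1 ≤ P.toNat := by omega
    have hm1 : 1 ≤ m.toNat := by omega
    have hA := startLoop_eq_spec toks P.toNat m.toNat hp1 hm1 0
      (fun t ht => absurd ht (Nat.not_lt_zero t))
    have hB := scan_eq_spec toks P.toNat m.toNat hp1 hm1 0 0 (Nat.le_refl 0)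
      (Nat.mul_pos hp1 hm1) (fun e he => absurd he (Nat.not_lt_zero e)) (Or.inl rfl)
      (fun s hw => by have := Nat.mul_pos hp1 hm1; omega)
    simp only [Nat.cast_zero] at hA hB
    simp only [pvA_ploop, pvB_ploop]
    rw [hPe, hme, hA, hB]
    cases h : pvSpecOpt toks P.toNat m.toNat with
    | some v => rfl
    | none =>
      show pvA_ploop toks (toks.length : Int) ((m.toNat : Nat) : Int) Ps
         = pvB_ploop toks (toks.length : Int) ((m.toNat : Nat) : Int) Ps
      rw [← hme]
      exact ih (fun Q hQ => hall Q (List.mem_cons_of_mem _ hQ))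

lemma floordiv_nonpos (n m : Int) (hn : 0 ≤ n) (hm : m < 0) : PySem.Int.floordiv n m ≤ 0 := by
  have h1 := PySem.Int.floordiv_mul_add_mod n m
  have h2 := PySem.Int.mod_neg_bounds n (b := m) hm
  nlinarith [h2.1, h2.2]

-- ===== VERDICT (by name: the statement is the Claim_ definition above) =====
theorem detect_repetition_string_spec : Claim_equal_detect_repetition_string := by
  intro toks mp Mp mr _ hpre
  obtain ⟨h1, h2⟩ := hpre
  unfold Spec_detect_repetition_string detect_repetition_string detect_repetition_string_alt
  show pvA_ploop toks (toks.length : Int) mr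
        (PySem.List.pyRange mp (min (Mp + 1) (PySem.Int.floordiv (toks.length : Int) mr + 1)) 1)
     = pvB_ploop toks (toks.length : Int) mr
        (PySem.List.pyRange mp (min (Mp + 1) (PySem.Int.floordiv (toks.length : Int) mr + 1)) 1)
  by_cases hm : 1 ≤ mr
  · exact ploop_eq toks mr hm _
      (fun P hP => by rw [PySem.List.mem_pyRange_one] at hP; omega)
  · have hm' : mr < 0 := by omega
    have hfd := floordiv_nonpos (toks.length : Int) mr (by positivity) hm'
    have hmin := min_le_right (Mp + 1) (PySem.Int.floordiv (toks.length : Int) mr + 1)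
    rw [PySem.List.pyRange_one_eq_nil (by omega)]
    rfl
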